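-- pv_equiv track=rewrite | github.com/zidarsk8/aoc2020 | aoc7.py | reverse_connections
-- ===== SOURCE A (Python) =====
-- def reverse_connections(connections):
--     t = [
--         (bag, parent)
--         for parent, items in connections.items()
--         for n, bag in items
--         if items
--     ]
--     rev = {bag: [] for bag, _ in t}
--
--     for bag, parent in t:
--         rev[bag].append(parent)
--     return rev
-- ===== SOURCE B (Python) =====
-- def reverse_connections(connections):
--     # Two-phase group-by: first the distinct child bags in edge order,
--     # then each bag's parent list is rebuilt by rescanning the connections.
--     order = []
--     for items in connections.values():
--         for _, bag in items:
--             if bag not in order: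
--                 order.append(bag)
--     return {bag: [parent for parent, items in connections.items()
--                   for _, b in items if b == bag]
--             for bag in order}
-- ===== Notes on version B (the rewrite author's own statement) =====
-- stated objective: alternative
-- what changed: Replaces A's streaming dict build (flat edge list, key-seeding dict comprehension, then an append loop mutating per-key lists) with a two-phase group-by that never appends into a dict: first collect the distinct child bags in edge order, then construct each bag's parent list independently by a fresh comprehension scan over the connections.
import Mathlib
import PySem

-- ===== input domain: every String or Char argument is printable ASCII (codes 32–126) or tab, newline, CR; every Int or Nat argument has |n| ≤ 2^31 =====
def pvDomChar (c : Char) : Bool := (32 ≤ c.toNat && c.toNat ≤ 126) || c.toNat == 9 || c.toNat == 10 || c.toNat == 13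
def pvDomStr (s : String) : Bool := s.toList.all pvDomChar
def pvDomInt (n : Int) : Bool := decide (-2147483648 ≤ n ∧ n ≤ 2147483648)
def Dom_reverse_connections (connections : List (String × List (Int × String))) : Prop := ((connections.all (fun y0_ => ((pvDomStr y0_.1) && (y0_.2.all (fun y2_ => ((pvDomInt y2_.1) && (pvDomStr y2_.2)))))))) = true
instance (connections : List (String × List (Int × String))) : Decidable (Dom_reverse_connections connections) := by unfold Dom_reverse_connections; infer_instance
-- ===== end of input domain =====

-- B replaces A's streaming dict build (flat edge list, key-seeding comprehension, append loop)
-- with a two-phase group-by: collect the distinct child bags in edge order, then rebuild each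
-- bag's parent list by rescanning the connections; equal return value is proved.


-- ===== PORT A =====
-- t = [(bag, parent) for parent, items in connections.items() for n, bag in items if items]
-- rev = {bag: [] for bag, _ in t}; for bag, parent in t: rev[bag].append(parent); return rev
def reverse_connections (connections : List (String × List (Int × String))) : List (String × List String) :=
  let t : List (String × String) :=
    connections.foldl (fun acc pi =>
      pi.2.foldl (fun acc2 nb => if !pi.2.isEmpty then acc2 ++ [(nb.2, pi.1)] else acc2) acc) []
  let rev0 : PySem.Dict String (List String) :=
    t.foldl (fun d p => d.insert p.1 ([] : List String)) PySem.Dict.empty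
  let rev : PySem.Dict String (List String) :=
    t.foldl (fun d p => d.modify p.1 [] (fun l => l ++ [p.2])) rev0
  rev.items

-- ===== PORT B =====
-- order = []; for items in connections.values(): for _, bag in items: if bag not in order: order.append(bag)
-- return {bag: [parent for parent, items in connections.items() for _, b in items if b == bag] for bag in order}
def reverse_connections_alt (connections : List (String × List (Int × String))) : List (String × List String) :=
  let order : List String :=
    connections.foldl (fun ord pi =>
      pi.2.foldl (fun o nb => if o.contains nb.2 then o else o ++ [nb.2]) ord) []
  (order.foldl (fun d bag =>
      d.insert bag
        (connections.foldl (fun acc pi =>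
          pi.2.foldl (fun a nb => if nb.2 == bag then a ++ [pi.1] else a) acc) []))
    PySem.Dict.empty).items

-- ===== PRECONDITION & SPEC =====
def Spec_reverse_connections (connections : List (String × List (Int × String))) (out : List (String × List String)) : Prop := out = reverse_connections_alt connections
instance (connections : List (String × List (Int × String))) (out : List (String × List String)) : Decidable (Spec_reverse_connections connections out) := by unfold Spec_reverse_connections; infer_instance

-- ===== CLAIM (what is proved, stated in full; the proofs are below) =====
def Claim_equal_reverse_connections : Prop := ∀ (connections : List (String × List (Int × String))), Dom_reverse_connections connections → Spec_reverse_connections connections (reverse_connections connections)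

-- ===== LEMMAS AND PROOFS =====

-- the flat (bag, parent) edge list both programs traverse
def pvEdges (connections : List (String × List (Int × String))) : List (String × String) :=
  connections.flatMap (fun pi => pi.2.map (fun nb => (nb.2, pi.1)))

-- A's comprehension (the 'if items' filter is a no-op) builds exactly the edge list
theorem pvA_t (connections : List (String × List (Int × String))) (acc : List (String × String)) :
    connections.foldl (fun acc pi =>
      pi.2.foldl (fun acc2 nb => if !pi.2.isEmpty then acc2 ++ [(nb.2, pi.1)] else acc2) acc) acc
      = acc ++ pvEdges connections := by
  induction connections generalizing acc with
  | nil => simp [pvEdges]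
  | cons hd tl ih =>
    simp only [List.foldl_cons, ih, pvEdges, List.flatMap_cons, ← List.append_assoc]
    congr 1
    rcases h : hd.2 with _ | ⟨x, xs⟩
    · simp
    · rw [← h]
      have hne : hd.2.isEmpty = false := by simp [h]
      simp only [hne, Bool.not_false, if_true]
      exact PySem.List.foldl_append_singleton_eq_map (fun nb => (nb.2, hd.1)) hd.2 acc

-- any nested fold over connections' items is a fold over the edge list
theorem pvFlatten {γ : Type} (f : γ → String × String → γ)
    (connections : List (String × List (Int × String))) (init : γ) :
    connections.foldl (fun a pi => pi.2.foldl (fun a2 nb => f a2 (nb.2, pi.1)) a) init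
      = (pvEdges connections).foldl f init := by
  induction connections generalizing init with
  | nil => simp [pvEdges]
  | cons hd tl ih =>
    simp only [List.foldl_cons, ih, pvEdges, List.flatMap_cons, List.foldl_append, List.foldl_map]

-- B's dedup loop over the edge list is a PySem.Set build
theorem pvOrderAdd (t : List (String × String)) (s : List String) :
    t.foldl (fun o e => if o.contains e.1 then o else o ++ [e.1]) s
      = t.foldl (fun s e => PySem.Set.add s e.1) s := by
  induction t generalizing s with
  | nil => rfl
  | cons e tl ih =>
    simp only [List.foldl_cons, PySem.Set.add_eq_ite, List.contains_eq_mem]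
    by_cases h : e.1 ∈ s <;> simp [h]

-- the seed loop keeps every value []
theorem pvSeedGetD (t : List (String × String)) (d : PySem.Dict String (List String)) (k : String)
    (h : d.getD k [] = []) :
    (t.foldl (fun d p => d.insert p.1 ([] : List String)) d).getD k ([] : List String) = [] := by
  induction t generalizing d with
  | nil => exact h
  | cons p tl ih =>
    refine ih _ ?_
    rw [PySem.Dict.getD_insert]
    split <;> simp [h]

-- updating a set with elements it already has is a no-op
theorem pvUpdateSelf (L : List String) :
    PySem.Set.update (PySem.Set.ofList L) L = PySem.Set.ofList L := by
  rw [PySem.Set.update_eq_append_filter]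
  have : (PySem.Set.ofList L).filter (fun y => !(PySem.Set.ofList L).contains y) = [] := by
    rw [List.filter_eq_nil_iff]
    intro y hy
    simp [PySem.Set.contains_eq_listContains, List.contains_eq_mem, hy]
  rw [this, List.append_nil]

-- ===== VERDICT (by name: the statement is the Claim_ definition above) =====
theorem reverse_connections_spec : Claim_equal_reverse_connections := by
  intro connections _
  unfold Spec_reverse_connections reverse_connections reverse_connections_alt
  rw [pvA_t]
  simp only [List.nil_append]
  set t := pvEdges connections with ht
  -- the shared key order and per-key parent lists
  set L : List String := t.map Prod.fst with hL
  set P : String → List String := fun k => (t.filter (fun p => p.1 == k)).map (fun p => p.2) with hP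
  -- ---- A's side ----
  set seed : PySem.Dict String (List String) :=
    t.foldl (fun d p => d.insert p.1 ([] : List String)) PySem.Dict.empty with hseed
  set revA : PySem.Dict String (List String) :=
    t.foldl (fun d p => d.modify p.1 [] (fun l => l ++ [p.2])) seed with hrevA
  have hkseed : seed.keys = PySem.Set.ofList L := by
    have := PySem.Dict.keys_foldl_insert_key t Prod.fst
      (fun _ _ => ([] : List String)) PySem.Dict.empty
    rw [hseed]
    calc (t.foldl (fun d p => d.insert p.1 ([] : List String)) PySem.Dict.empty).keys
        = PySem.Set.update PySem.Dict.empty.keys (t.map Prod.fst) := this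
      _ = PySem.Set.ofList L := by
          rw [PySem.Dict.keys_empty, PySem.Set.update_nil_left, hL]
  have hkA : revA.keys = PySem.Set.ofList L := by
    have := PySem.Dict.keys_foldl_modify_key t Prod.fst ([] : List String)
      (fun _ p l => l ++ [p.2]) seed
    rw [hrevA]
    calc (t.foldl (fun d p => d.modify p.1 [] (fun l => l ++ [p.2])) seed).keys
        = PySem.Set.update seed.keys (t.map Prod.fst) := this
      _ = PySem.Set.ofList L := by rw [hkseed, ← hL, pvUpdateSelf]
  have hgA : ∀ k, revA.getD k [] = P k := by
    intro k
    rw [hrevA]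
    calc (t.foldl (fun d p => d.modify p.1 [] (fun l => l ++ [p.2])) seed).getD k []
        = seed.getD k [] ++ (t.filter (fun p => p.1 == k)).map (fun p => p.2) :=
          PySem.Dict.getD_foldl_modify_append t seed k
      _ = P k := by
          rw [hseed, pvSeedGetD t PySem.Dict.empty k (PySem.Dict.getD_empty k [])]
          simp [hP]
  have hAitems : revA.items = (PySem.Set.ofList L).map (fun k => (k, P k)) := by
    rw [PySem.Dict.items_eq_map_keys revA (by rw [hkA]; exact PySem.Set.nodup_ofList L) [], hkA]
    exact List.map_congr_left (fun k _ => by rw [hgA])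
  -- ---- B's side ----
  have horder : connections.foldl (fun ord pi =>
      pi.2.foldl (fun o nb => if o.contains nb.2 then o else o ++ [nb.2]) ord) []
        = PySem.Set.ofList L := by
    calc connections.foldl (fun ord pi =>
          pi.2.foldl (fun o nb => if o.contains nb.2 then o else o ++ [nb.2]) ord) []
        = t.foldl (fun o e => if o.contains e.1 then o else o ++ [e.1]) [] :=
          pvFlatten (fun o e => if o.contains e.1 then o else o ++ [e.1]) connections []
      _ = t.foldl (fun s e => PySem.Set.add s e.1) [] := pvOrderAdd t []
      _ = PySem.Set.ofList L := by
          rw [← PySem.Set.update_map_eq_foldl_add t Prod.fst [], PySem.Set.update_nil_left, hL]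
  have hparents : ∀ bag, connections.foldl (fun acc pi =>
      pi.2.foldl (fun a nb => if nb.2 == bag then a ++ [pi.1] else a) acc) [] = P bag := by
    intro bag
    calc connections.foldl (fun acc pi =>
          pi.2.foldl (fun a nb => if nb.2 == bag then a ++ [pi.1] else a) acc) []
        = t.foldl (fun a e => if e.1 == bag then a ++ [e.2] else a) [] :=
          pvFlatten (fun a e => if e.1 == bag then a ++ [e.2] else a) connections []
      _ = P bag := by
          rw [PySem.List.foldl_append_if (fun e => e.1 == bag) (fun e => e.2) t []]
          simp [hP]
  rw [hAitems, horder]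
  set v : String → List String := fun bag => connections.foldl (fun acc pi =>
      pi.2.foldl (fun a nb => if nb.2 == bag then a ++ [pi.1] else a) acc) [] with hv
  have hfresh : ∀ a ∈ PySem.Set.ofList L,
      (PySem.Dict.empty : PySem.Dict String (List String)).contains (id a) = false :=
    fun a _ => PySem.Dict.contains_empty a
  have hnd : ((PySem.Set.ofList L).map id).Nodup := by
    rw [List.map_id]; exact PySem.Set.nodup_ofList L
  have hins : ((PySem.Set.ofList L).foldl (fun d bag => d.insert bag (v bag))
        PySem.Dict.empty).items
      = [] ++ (PySem.Set.ofList L).map (fun a => (a, v a)) :=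
    PySem.Dict.items_foldl_insert_fresh (PySem.Set.ofList L) id v PySem.Dict.empty hfresh hnd
  rw [hins]
  simp only [List.nil_append]
  exact List.map_congr_left (fun k _ => by rw [hv]; exact congrArg (Prod.mk k) (hparents k).symm)
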